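-- pv_equiv track=rewrite | github.com/bharathv2605-arch/Research_Gap_finder | keyword_extractor.py | get_common_keywords
-- ===== SOURCE A (Python) =====
-- def get_common_keywords(keywords_list):
--     """
--     Find keywords that appear across multiple papers.
--     Args:
--         keywords_list: List of keyword lists (one per paper)
--     Returns:
--         Set of common keywords found in multiple papers
--     """
--     if len(keywords_list) < 2:
--         return set()
--
--     # Get keyword sets for each paper
--     keyword_sets = []
--     for keywords in keywords_list:
--         kw_set = set(kw for kw, score in keywords)
--         keyword_sets.append(kw_set)
--
--     # Find keywords appearing in at least 2 papers
--     all_keywords = {}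
--     for kw_set in keyword_sets:
--         for kw in kw_set:
--             all_keywords[kw] = all_keywords.get(kw, 0) + 1
--
--     common = {kw for kw, count in all_keywords.items() if count >= 2}
--     return common
-- ===== SOURCE B (Python) =====
-- def get_common_keywords(keywords_list):
--     """
--     Find keywords that appear across multiple papers.
--     Args:
--         keywords_list: List of keyword lists (one per paper)
--     Returns:
--         Set of common keywords found in multiple papers
--     """
--     if len(keywords_list) < 2:
--         return set()
--     # set algebra: a keyword is common iff some paper and some OTHER paper both contain it
--     sets = [{kw for kw, score in keywords} for keywords in keywords_list]
--     common = set()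
--     for i, s in enumerate(sets):
--         rest = sets[:i] + sets[i + 1:]
--         common |= {kw for kw in s if any(kw in t for t in rest)}
--     return common
-- ===== Notes on version B (the rewrite author's own statement) =====
-- stated objective: alternative
-- what changed: Replaces A's occurrence-counting dict plus final count>=2 filtering pass with set algebra: for each paper's keyword set, the keywords also found in any of the other papers' sets are unioned into the result, so no counts are ever maintained.
import Mathlib
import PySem

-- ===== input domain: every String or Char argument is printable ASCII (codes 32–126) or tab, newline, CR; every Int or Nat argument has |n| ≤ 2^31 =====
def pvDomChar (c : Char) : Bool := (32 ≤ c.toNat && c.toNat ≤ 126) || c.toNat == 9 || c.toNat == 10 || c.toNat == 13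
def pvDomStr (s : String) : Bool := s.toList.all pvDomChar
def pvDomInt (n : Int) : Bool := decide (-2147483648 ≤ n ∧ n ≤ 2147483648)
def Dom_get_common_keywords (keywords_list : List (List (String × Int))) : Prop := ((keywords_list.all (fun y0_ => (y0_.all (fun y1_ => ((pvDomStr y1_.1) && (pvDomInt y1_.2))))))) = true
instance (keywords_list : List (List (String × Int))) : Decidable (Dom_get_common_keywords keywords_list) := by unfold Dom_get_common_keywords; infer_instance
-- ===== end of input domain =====

-- B replaces A's count-dict-then-filter with set algebra (per paper, intersect with the union of the
-- other papers, expressed by membership tests); objective: alternative algorithm, same result set.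
-- Both functions return a Python set; set iteration order is not observable in the result.

-- ===== PORT A =====
def get_common_keywords (keywords_list : List (List (String × Int))) : List String :=
  if keywords_list.length < 2 then [] else
    -- keyword_sets: for keywords in keywords_list: append set(kw for kw, score in keywords)
    let keyword_sets : List (PySem.Set String) :=
      keywords_list.foldl (fun acc keywords =>
        acc ++ [PySem.Set.ofList (keywords.map (fun p => p.1))]) []
    -- all_keywords[kw] = all_keywords.get(kw, 0) + 1 over each set
    let all_keywords : PySem.Dict String Int :=
      keyword_sets.foldl (fun d kw_set =>
        kw_set.foldl (fun d kw => d.insert kw (d.getD kw 0 + 1)) d) PySem.Dict.empty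
    -- common = {kw for kw, count in all_keywords.items() if count >= 2}
    PySem.Set.ofList (((all_keywords.items.filter (fun p => 2 ≤ p.2)).map (fun p => p.1)))

-- ===== PORT B =====
def get_common_keywords_alt (keywords_list : List (List (String × Int))) : List String :=
  if keywords_list.length < 2 then [] else
    -- sets = [{kw for kw, score in keywords} for keywords in keywords_list]
    let sets : List (PySem.Set String) :=
      keywords_list.map (fun keywords => PySem.Set.ofList (keywords.map (fun p => p.1)))
    -- for i, s in enumerate(sets): rest = sets[:i] + sets[i+1:]; common |= {kw for kw in s if any(kw in t for t in rest)}
    (PySem.List.enumerate sets 0).foldl (fun common is_ =>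
      let rest := PySem.List.slice sets none (some is_.1) ++ PySem.List.slice sets (some (is_.1 + 1)) none
      PySem.Set.update common (PySem.Set.ofList (is_.2.filter (fun kw =>
        rest.any (fun t => PySem.Set.contains t kw))))) PySem.Set.empty

-- ===== PRECONDITION & SPEC =====
def Spec_get_common_keywords (keywords_list : List (List (String × Int))) (out : List String) : Prop := out = get_common_keywords_alt keywords_list
instance (keywords_list : List (List (String × Int))) (out : List String) : Decidable (Spec_get_common_keywords keywords_list out) := by unfold Spec_get_common_keywords; infer_instance

-- ===== CLAIM (what is proved, stated in full; the proofs are below) =====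
def Claim_equal_get_common_keywords : Prop := ∀ (keywords_list : List (List (String × Int))), Dom_get_common_keywords keywords_list → Spec_get_common_keywords keywords_list (get_common_keywords keywords_list)

-- ===== LEMMAS AND PROOFS =====

-- set(filter) = filter(set): dedup commutes with a pure filter
theorem pv_ofList_filter (xs : List String) (p : String → Bool) :
    PySem.Set.ofList (xs.filter p) = (PySem.Set.ofList xs).filter p := by
  induction xs using List.reverseRecOn with
  | nil => rfl
  | append_singleton xs x ih =>
    rw [List.filter_append, PySem.Set.ofList_append_singleton, PySem.Set.add_eq_ite]
    by_cases hp : p x = true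
    · simp only [List.filter_cons, hp, if_pos, List.filter_nil]
      rw [PySem.Set.ofList_append_singleton, ih, PySem.Set.add_eq_ite]
      by_cases hm : x ∈ PySem.Set.ofList xs
      · rw [if_pos hm, if_pos (by simp [List.mem_filter, hm, hp])]
      · rw [if_neg hm, if_neg (by simp [List.mem_filter, hm]), List.filter_append]
        simp [hp]
    · have hfx : List.filter p [x] = [] := by simp [hp]
      rw [hfx, List.append_nil, ih]
      by_cases hm : x ∈ PySem.Set.ofList xs
      · rw [if_pos hm]
      · rw [if_neg hm, List.filter_append, hfx, List.append_nil]

-- a loop 'for x in l: common |= f(x)' from c is one big update by the concatenation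
theorem pv_foldl_update_flatMap {α : Type} (l : List α) (f : α → List String) (c : PySem.Set String) :
    l.foldl (fun c x => PySem.Set.update c (f x)) c = PySem.Set.update c (l.flatMap f) := by
  induction l generalizing c with
  | nil => simp [PySem.Set.update_nil]
  | cons a l ih => rw [List.foldl_cons, ih, List.flatMap_cons, PySem.Set.update_append]

theorem pv_any_eq_decide_countP {α : Type} (l : List α) (p : α → Bool) :
    l.any p = decide (0 < l.countP p) := by
  by_cases h : l.any p = true
  · simp only [h]
    rcases List.any_eq_true.mp h with ⟨a, ha, hp⟩
    simp [List.countP_pos_iff]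
    exact ⟨a, ha, hp⟩
  · simp only [Bool.not_eq_true] at h
    simp only [h]
    rcases List.any_eq_false.mp h with h'
    have : l.countP p = 0 := List.countP_eq_zero.mpr (by intro a ha; exact by simpa using h' a ha)
    simp [this]

-- count of kw in a flattening of duplicate-free chunks = number of chunks containing kw
theorem pv_count_flatten (xss : List (List String)) (kw : String)
    (h : ∀ s ∈ xss, s.Nodup) :
    xss.flatten.count kw = xss.countP (fun s => PySem.Set.contains s kw) := by
  induction xss with
  | nil => rfl
  | cons s xss ih =>
    rw [List.flatten_cons, List.count_append, List.countP_cons,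
      ih (fun t ht => h t (List.mem_cons_of_mem _ ht))]
    by_cases hm : kw ∈ s
    · have h1 : s.count kw = 1 := List.count_eq_one_of_mem (h s (List.mem_cons_self)) hm
      simp [h1, hm]
      omega
    · have h0 : s.count kw = 0 := List.count_eq_zero.mpr hm
      simp [h0, hm]

theorem pv_main (L : List (List (String × Int))) :
    get_common_keywords L = get_common_keywords_alt L := by
  unfold get_common_keywords get_common_keywords_alt
  by_cases hlen : L.length < 2
  · simp [hlen]
  · simp only [hlen, if_false]
    rw [PySem.List.foldl_append_singleton_eq_map, List.nil_append]
    set sets : List (PySem.Set String) :=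
      L.map (fun keywords => PySem.Set.ofList (keywords.map (fun p => p.1))) with hsets
    have hnodup : ∀ s ∈ sets, List.Nodup s := by
      intro s hs
      rcases List.mem_map.mp hs with ⟨kws, _, rfl⟩
      exact PySem.Set.nodup_ofList _
    set F : List String := sets.flatten with hF
    set P : String → Bool :=
      fun kw => decide (2 ≤ sets.countP (fun t => PySem.Set.contains t kw)) with hP
    -- A side: the counting dict is Counter(F); its ≥2 items are a filter of set(F)
    rw [← List.foldl_flatten, PySem.Dict.foldl_insert_getD_add_one_eq_counter,
      PySem.Dict.items_counter, List.filter_map, List.map_map, ← hF]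
    have hfst : (Prod.fst ∘ fun k => (k, (F.count k : Int))) = id := rfl
    rw [hfst, List.map_id]
    have hqP : ∀ kw ∈ PySem.Set.ofList F,
        (((fun p => decide (2 ≤ p.2)) ∘ fun k => (k, (F.count k : Int))) kw) = P kw := by
      intro kw _
      show decide (2 ≤ ((F.count kw : Nat) : Int)) = P kw
      rw [hP, hF, pv_count_flatten sets kw hnodup, decide_eq_decide]
      omega
    rw [List.filter_congr hqP,
      PySem.Set.ofList_eq_self_of_nodup _ ((PySem.Set.nodup_ofList F).filter P)]
    -- B side: the update loop is one big set() of a flatMap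
    rw [pv_foldl_update_flatMap, PySem.Set.update_empty]
    have hchunk : ∀ q ∈ PySem.List.enumerate sets 0,
        (fun is_ => PySem.Set.ofList (is_.2.filter (fun kw =>
          (PySem.List.slice sets none (some is_.1) ++
            PySem.List.slice sets (some (is_.1 + 1)) none).any
              (fun t => PySem.Set.contains t kw)))) q
          = (fun is_ => is_.2.filter P) q := by
      intro q hq
      rcases (PySem.List.mem_enumerate_iff _ _ _).mp hq with ⟨k, hk, rfl⟩
      simp only
      rw [zero_add, PySem.List.slice_to_natCast,
        show ((k : Int) + 1) = ((k + 1 : Nat) : Int) by push_cast; ring,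
        PySem.List.slice_from_natCast]
      have hsk : sets[k] ∈ sets := List.getElem_mem hk
      have hnd : (sets[k]).Nodup := hnodup _ hsk
      have hfc : ∀ kw ∈ sets[k],
          ((sets.take k ++ sets.drop (k + 1)).any (fun t => PySem.Set.contains t kw)) = P kw := by
        intro kw hkw
        rw [List.any_append, pv_any_eq_decide_countP, pv_any_eq_decide_countP,
          ← Bool.decide_or, hP]
        have hsplit : sets = sets.take k ++ sets[k] :: sets.drop (k + 1) := by
          conv_lhs => rw [← List.take_append_drop k sets]
          rw [List.drop_eq_getElem_cons hk]
        have hck : PySem.Set.contains sets[k] kw = true := by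
          rw [PySem.Set.contains_iff]; exact hkw
        rw [decide_eq_decide]
        conv_rhs => rw [hsplit]
        rw [List.countP_append, List.countP_cons, hck]
        simp only [if_pos]
        omega
      rw [List.filter_congr hfc,
        PySem.Set.ofList_eq_self_of_nodup _ (hnd.filter P)]
    rw [List.flatMap_def, List.map_congr_left hchunk, ← List.flatMap_def,
      ← List.filter_flatMap]
    have hsnd : (PySem.List.enumerate sets 0).flatMap (fun is_ => is_.2) = F := by
      rw [List.flatMap_def, PySem.List.map_snd_enumerate, hF]
    rw [hsnd, pv_ofList_filter]

-- ===== VERDICT (by name: the statement is the Claim_ definition above) =====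
theorem get_common_keywords_spec : Claim_equal_get_common_keywords := by
  intro L _
  unfold Spec_get_common_keywords
  exact pv_main L
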